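-- pv_equiv track=rewrite | github.com/clara-upem/Chess | chess.py | mvt_f_diag_y
-- ===== SOURCE A (Python) =====
-- def check_position_piece(x, y, joueur):
--     """
--     Permet de verifier si une piece est dans le set
--     :param x:int, index d'un tableau (lignes)
--     :param y:int, index du tableau (colonnes)
--     :param joueur: list, tableau de pieces d'un joueur
--     :return:True si il y a une pieces et False si il n'y en a pas
--
--     >>> check_position_piece(1,1,[['P', (1, 0)]])
--     False
--
--     >>> check_position_piece(1, 0, [['P', (1, 0)]])
--     True
--     """
--     for e in joueur:
--         if e[1] == (x, y):
--             return True
--     return False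
--
-- def est_dans_plateau(x, y):
--     """
--     Permet de verifier si la piece est dans le plateau
--     :param x:int, index d'un tableau (lignes)
--     :param y:int, index du tableau (colonnes)
--     :return:True si la piece est dans le plateau et False sinon
--
--     >>> est_dans_plateau(1,1)
--     True
--
--     >>> est_dans_plateau(-1,0)
--     False
--     """
--     if 0 <= x <= 7 and 0 <= y <= 7:
--         return True
--     else:
--         return False
--
-- def mvt_f_diag_y(x, y, joueur, adversaire):
--     """
--     Permet de définir tous les mouvements du fou de l'autre sens
--     :param x:int, index d'un tableau (lignes)
--     :param y:int, index d'un tableau (colonnes)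
--     :param joueur: list, tableau pièces du joueur 1
--     :param adversaire: list, tableau pièces du second joueur
--     :return: return mvt_fou_temp, mange_fou_temp(list,list): permet d'obtenir
--     le tableau de déplacement possible et le tableau de pièces qui peuvent
--     etre mange.
--     """
--     mvt_fou_temp = []
--     mange_fou_temp = []
--     for i in range(-8, 8):
--         if est_dans_plateau(x + i, y + i) and (x + i, y + i) != (x, y):
--             if check_position_piece(x + i, y + i, adversaire):
--                 if y + i < y:
--                     mange_fou_temp = [(x + i, y + i)]
--                     mvt_fou_temp = []
--                 else:
--                     mange_fou_temp.append((x + i, y + i))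
--                     break
--             elif not check_position_piece(x + i, y + i, joueur):
--                 mvt_fou_temp.append((x + i, y + i))
--             elif (y + i) > y:
--                 break
--             else:
--                 mvt_fou_temp = []
--                 mange_fou_temp = []
--
--     return mvt_fou_temp, mange_fou_temp
-- ===== SOURCE B (Python) =====
-- def _walk(x, y, idxs, own, adv):
--     # Walk squares (x+i, y+i) for i in idxs; collect empty squares until a
--     # blocker: an adversary piece is the single capture, an own piece just stops.
--     moves, caps = [], []
--     for i in idxs:
--         sq = (x + i, y + i)
--         if sq in adv:
--             caps.append(sq)
--             break
--         if sq in own: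
--             break
--         moves.append(sq)
--     return moves, caps
--
--
-- def mvt_f_diag_y(x, y, joueur, adversaire):
--     own = {tuple(p[1]) for p in joueur}
--     adv = {tuple(p[1]) for p in adversaire}
--     # indices i with (x+i, y+i) on the board and -8 <= i <= 7
--     lo = max(-8, -x, -y)
--     hi = min(7, 7 - x, 7 - y)
--     # lower walk: outward from the piece (i = -1, -2, ...), then reversed
--     lm, lc = _walk(x, y, range(min(-1, hi), lo - 1, -1), own, adv)
--     # upper walk: outward with i = +1, +2, ...
--     um, uc = _walk(x, y, range(max(1, lo), hi + 1), own, adv)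
--     return lm[::-1] + um, lc + uc
-- ===== Notes on version B (the rewrite author's own statement) =====
-- stated objective: alternative
-- what changed: A scans all 16 offsets of range(-8,8) in one pass, repeatedly re-scanning the piece lists per square and clearing/rebuilding its move list when it meets a blocker on the lower side; B builds each side's occupancy set once and does two explicit outward walks from (x,y) along the diagonal (clamped to the board), stopping at the first blocker, then reverses the lower moves.
import Mathlib
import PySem

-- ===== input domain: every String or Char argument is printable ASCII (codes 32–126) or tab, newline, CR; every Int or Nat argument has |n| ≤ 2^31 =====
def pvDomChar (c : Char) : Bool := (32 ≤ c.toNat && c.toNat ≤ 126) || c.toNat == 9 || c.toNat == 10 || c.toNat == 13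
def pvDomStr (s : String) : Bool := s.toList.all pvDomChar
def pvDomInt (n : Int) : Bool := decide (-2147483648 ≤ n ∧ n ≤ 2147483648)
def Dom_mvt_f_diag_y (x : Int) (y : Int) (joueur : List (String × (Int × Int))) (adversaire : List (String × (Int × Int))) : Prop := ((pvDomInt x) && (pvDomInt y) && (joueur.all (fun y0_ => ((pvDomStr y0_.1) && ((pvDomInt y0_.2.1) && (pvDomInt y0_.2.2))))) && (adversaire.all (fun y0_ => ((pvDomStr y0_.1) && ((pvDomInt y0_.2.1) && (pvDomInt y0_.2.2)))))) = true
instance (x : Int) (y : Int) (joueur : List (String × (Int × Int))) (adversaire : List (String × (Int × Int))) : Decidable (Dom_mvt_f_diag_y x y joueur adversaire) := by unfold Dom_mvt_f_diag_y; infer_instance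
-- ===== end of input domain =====

-- B replaces A's single 16-step scan with its reset/rebuild bookkeeping by two explicit
-- outward walks along the diagonal, each occupancy set built once (alternative algorithm).

-- ===== PORT A =====
def checkPos (x : Int) (y : Int) (joueur : List (String × (Int × Int))) : Bool :=
  match joueur with
  | [] => false
  | e :: rest => if e.2 = (x, y) then true else checkPos x y rest
def estDansPlateau (x : Int) (y : Int) : Bool :=
  decide (0 ≤ x ∧ x ≤ 7 ∧ 0 ≤ y ∧ y ≤ 7)
def stepA (x : Int) (y : Int) (joueur : List (String × (Int × Int)))
    (adversaire : List (String × (Int × Int)))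
    (s : List (Int × Int) × List (Int × Int) × Bool) (i : Int) :
    List (Int × Int) × List (Int × Int) × Bool :=
  match s with
  | (mvt, mange, done) =>
    if done then (mvt, mange, done)
    else if estDansPlateau (x + i) (y + i) && ((x + i, y + i) != (x, y)) then
      if checkPos (x + i) (y + i) adversaire then
        if y + i < y then ([], [(x + i, y + i)], false)
        else (mvt, mange ++ [(x + i, y + i)], true)
      else if !checkPos (x + i) (y + i) joueur then
        (mvt ++ [(x + i, y + i)], mange, false)
      else if y + i > y then (mvt, mange, true)
      else ([], [], false)
    else (mvt, mange, done)
def mvt_f_diag_y (x : Int) (y : Int) (joueur : List (String × (Int × Int))) (adversaire : List (String × (Int × Int))) : (List (Int × Int)) × (List (Int × Int)) :=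
  let r := (PySem.List.pyRange (-8) 8 1).foldl (stepA x y joueur adversaire) ([], [], false)
  (r.1, r.2.1)


-- ===== PORT B =====
def walkB (x : Int) (y : Int) (own : PySem.Set (Int × Int)) (adv : PySem.Set (Int × Int)) :
    List Int → List (Int × Int) × List (Int × Int)
  | [] => ([], [])
  | i :: rest =>
    let sq := (x + i, y + i)
    if PySem.Set.contains adv sq then ([], [sq])
    else if PySem.Set.contains own sq then ([], [])
    else
      let p := walkB x y own adv rest
      (sq :: p.1, p.2)

def mvt_f_diag_y_alt (x : Int) (y : Int) (joueur : List (String × (Int × Int))) (adversaire : List (String × (Int × Int))) : (List (Int × Int)) × (List (Int × Int)) :=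
  let own := PySem.Set.ofList (joueur.map (·.2))
  let adv := PySem.Set.ofList (adversaire.map (·.2))
  let lo := max (-8) (max (-x) (-y))
  let hi := min 7 (min (7 - x) (7 - y))
  let l := walkB x y own adv (PySem.List.pyRange (min (-1) hi) (lo - 1) (-1))
  let u := walkB x y own adv (PySem.List.pyRange (max 1 lo) (hi + 1) 1)
  (l.1.reverse ++ u.1, l.2 ++ u.2)


-- ===== PRECONDITION & SPEC =====
def Spec_mvt_f_diag_y (x : Int) (y : Int) (joueur : List (String × (Int × Int))) (adversaire : List (String × (Int × Int))) (out : (List (Int × Int)) × (List (Int × Int))) : Prop := out = mvt_f_diag_y_alt x y joueur adversaire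
instance (x : Int) (y : Int) (joueur : List (String × (Int × Int))) (adversaire : List (String × (Int × Int))) (out : (List (Int × Int)) × (List (Int × Int))) : Decidable (Spec_mvt_f_diag_y x y joueur adversaire out) := by unfold Spec_mvt_f_diag_y; infer_instance

-- ===== CLAIM (what is proved, stated in full; the proofs are below) =====
def Claim_equal_mvt_f_diag_y : Prop := ∀ (x : Int) (y : Int) (joueur : List (String × (Int × Int))) (adversaire : List (String × (Int × Int))), Dom_mvt_f_diag_y x y joueur adversaire → Spec_mvt_f_diag_y x y joueur adversaire (mvt_f_diag_y x y joueur adversaire)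

-- ===== LEMMAS AND PROOFS =====

theorem stepA_skip (x y : Int) (j a : List (String × (Int × Int)))
    (s : List (Int × Int) × List (Int × Int) × Bool) (i : Int)
    (h : estDansPlateau (x + i) (y + i) = false ∨ i = 0) :
    stepA x y j a s i = s := by
  obtain ⟨m, c, d⟩ := s
  rcases h with h | h
  · simp [stepA, h]
  · subst h
    simp [stepA]

theorem foldl_stepA_skip (x y : Int) (j a : List (String × (Int × Int)))
    (l : List Int) (s : List (Int × Int) × List (Int × Int) × Bool)
    (h : ∀ i ∈ l, estDansPlateau (x + i) (y + i) = false ∨ i = 0) :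
    l.foldl (stepA x y j a) s = s := by
  induction l with
  | nil => rfl
  | cons i rest ih =>
    simp only [List.foldl_cons]
    rw [stepA_skip x y j a s i (h i (by simp))]
    exact ih (fun t ht => h t (by simp [ht]))

theorem foldl_stepA_done (x y : Int) (j a : List (String × (Int × Int)))
    (l : List Int) (m c : List (Int × Int)) :
    l.foldl (stepA x y j a) (m, c, true) = (m, c, true) := by
  induction l with
  | nil => rfl
  | cons i rest ih => simpa only [List.foldl_cons, stepA] using ih

theorem checkPos_eq_mem (x y : Int) (l : List (String × (Int × Int))) :
    checkPos x y l = decide ((x, y) ∈ l.map (·.2)) := by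
  induction l with
  | nil => simp [checkPos]
  | cons e rest ih =>
    by_cases he : e.2 = (x, y)
    · simp [checkPos, he, List.mem_map]
    · simp only [checkPos, if_neg he, ih, List.map_cons, List.mem_cons]
      by_cases hm : (x, y) ∈ rest.map (·.2) <;> simp [hm, Ne.symm he]

theorem checkPos_eq_contains (x y : Int) (l : List (String × (Int × Int))) :
    checkPos x y l = PySem.Set.contains (PySem.Set.ofList (l.map (·.2))) (x, y) := by
  rw [checkPos_eq_mem]
  simp [PySem.Set.contains, PySem.Set.mem_ofList]

theorem lowerLoop (x y : Int) (joueur adversaire : List (String × (Int × Int))) :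
    ∀ (n : Nat) (a : Int), a + n ≤ 0 →
    (PySem.List.pyRange a (a + n) 1).foldl (stepA x y joueur adversaire) ([], [], false)
    = (let w := walkB x y (PySem.Set.ofList (joueur.map (·.2)))
          (PySem.Set.ofList (adversaire.map (·.2)))
          (PySem.List.pyRange (min (a + n - 1) (min (-1) (min (7 - x) (7 - y))))
            (max a (max (-x) (-y)) - 1) (-1));
       (w.1.reverse, w.2, false)) := by
  intro n
  induction n with
  | zero =>
    intro a ha
    rw [show a + ((0:Nat):Int) = a by simp]
    rw [PySem.List.pyRange_one_eq_nil le_rfl, PySem.List.pyRange_neg_one_eq_nil (by omega)]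
    rfl
  | succ n ih =>
    intro a ha
    have hcast : a + (((n+1:Nat)):Int) = (a + n) + 1 := by push_cast; ring
    rw [hcast] at ha ⊢
    set t := a + (n:Int) with ht
    have hat : a ≤ t := by omega
    by_cases hA : t < max (-x) (-y)
    · -- everything below the board: whole segment skipped, walk empty
      rw [foldl_stepA_skip _ _ _ _ _ _ (by
        intro i hi
        rw [PySem.List.mem_pyRange_one] at hi
        left; simp [estDansPlateau]; omega)]
      rw [PySem.List.pyRange_neg_one_eq_nil (by omega)]
      rfl
    · by_cases hC : min (-1) (min (7 - x) (7 - y)) < t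
      · -- t above the in-board band (t > H): skip the last step
        rw [PySem.List.pyRange_one_succ_right hat]
        rw [List.foldl_append]
        simp only [List.foldl_cons, List.foldl_nil]
        rw [stepA_skip _ _ _ _ _ _ (by left; simp [estDansPlateau]; omega)]
        rw [ih a (by omega)]
        rw [show min (t + 1 - 1) (min (-1) (min (7 - x) (7 - y)))
              = min (a + (n:Int) - 1) (min (-1) (min (7 - x) (7 - y))) by omega]
      · -- t in-board and negative
        have hest : estDansPlateau (x + t) (y + t) = true := by
          simp [estDansPlateau]; omega
        have hne : ((x + t, y + t) != (x, y)) = true := by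
          simp [bne]; omega
        rw [PySem.List.pyRange_one_succ_right hat]
        rw [List.foldl_append]
        simp only [List.foldl_cons, List.foldl_nil]
        rw [ih a (by omega)]
        rw [show min (a + (n:Int) - 1) (min (-1) (min (7 - x) (7 - y))) = t - 1 by omega]
        rw [show min (t + 1 - 1) (min (-1) (min (7 - x) (7 - y))) = t by omega]
        have hcons : PySem.List.pyRange t (max a (max (-x) (-y)) - 1) (-1)
            = t :: PySem.List.pyRange (t - 1) (max a (max (-x) (-y)) - 1) (-1) :=
          PySem.List.pyRange_neg_one_cons (by omega)
        rw [hcons]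
        simp only [walkB]
        have hchkA := checkPos_eq_contains (x + t) (y + t) adversaire
        have hchkJ := checkPos_eq_contains (x + t) (y + t) joueur
        simp only [stepA, hest, hne, Bool.and_self, if_neg (Bool.false_ne_true)]
        rw [hchkA, hchkJ]
        cases hb1 : PySem.Set.contains (PySem.Set.ofList (adversaire.map (·.2))) (x + t, y + t) with
        | true => simp [show y + t < y by omega]
        | false =>
          cases hb2 : PySem.Set.contains (PySem.Set.ofList (joueur.map (·.2))) (x + t, y + t) with
          | true => simp [show ¬ (y < y + t) by omega]
          | false => simp

theorem upperLoop (x y : Int) (joueur adversaire : List (String × (Int × Int))) :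
    ∀ (n : Nat) (a : Int) (m c : List (Int × Int)), 1 ≤ a →
    ∃ d, (PySem.List.pyRange a (a + n) 1).foldl (stepA x y joueur adversaire) (m, c, false)
    = (let w := walkB x y (PySem.Set.ofList (joueur.map (·.2)))
          (PySem.Set.ofList (adversaire.map (·.2)))
          (PySem.List.pyRange (max a (max 1 (max (-x) (-y))))
            (min (a + n - 1) (min (7 - x) (7 - y)) + 1) 1);
       (m ++ w.1, c ++ w.2, d)) := by
  intro n
  induction n with
  | zero =>
    intro a m c ha
    refine ⟨false, ?_⟩
    rw [show a + ((0:Nat):Int) = a by simp]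
    rw [PySem.List.pyRange_one_eq_nil le_rfl, PySem.List.pyRange_one_eq_nil (by omega)]
    simp [walkB]
  | succ n ih =>
    intro a m c ha
    have hcast : a + (((n+1:Nat)):Int) = (a + n) + 1 := by push_cast; ring
    rw [hcast]
    by_cases hA : min (7 - x) (7 - y) < a
    · -- above the board band: everything skipped, walk empty
      refine ⟨false, ?_⟩
      rw [foldl_stepA_skip _ _ _ _ _ _ (by
        intro i hi
        rw [PySem.List.mem_pyRange_one] at hi
        left; simp [estDansPlateau]; omega)]
      rw [PySem.List.pyRange_one_eq_nil (by omega)]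
      simp [walkB]
    · by_cases hB : a < max 1 (max (-x) (-y))
      · -- below the in-board band: skip this square
        rw [PySem.List.pyRange_one_cons (by omega), List.foldl_cons]
        rw [stepA_skip _ _ _ _ _ _ (by left; simp [estDansPlateau]; omega)]
        obtain ⟨d, hd⟩ := ih (a + 1) m c (by omega)
        rw [show (a + 1) + (n:Int) = a + (n:Int) + 1 by ring] at hd
        refine ⟨d, ?_⟩
        rw [hd]
        rw [show max (a + 1) (max 1 (max (-x) (-y))) = max a (max 1 (max (-x) (-y))) by omega]
      · -- in-board square
        have hest : estDansPlateau (x + a) (y + a) = true := by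
          simp [estDansPlateau]; omega
        have hne : ((x + a, y + a) != (x, y)) = true := by
          simp [bne]; omega
        rw [PySem.List.pyRange_one_cons (by omega), List.foldl_cons]
        rw [show max a (max 1 (max (-x) (-y))) = a by omega]
        have hconsW : PySem.List.pyRange a (min (a + (n:Int) + 1 - 1) (min (7 - x) (7 - y)) + 1) 1
            = a :: PySem.List.pyRange (a + 1) (min (a + (n:Int) + 1 - 1) (min (7 - x) (7 - y)) + 1) 1 :=
          PySem.List.pyRange_one_cons (by omega)
        rw [hconsW]
        simp only [walkB]
        have hchkA := checkPos_eq_contains (x + a) (y + a) adversaire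
        have hchkJ := checkPos_eq_contains (x + a) (y + a) joueur
        simp only [stepA, hest, hne, Bool.and_self, if_neg (Bool.false_ne_true)]
        rw [hchkA, hchkJ]
        cases hb1 : PySem.Set.contains (PySem.Set.ofList (adversaire.map (·.2))) (x + a, y + a) with
        | true =>
          refine ⟨true, ?_⟩
          rw [if_pos trivial, if_pos rfl, if_neg (show ¬ (y + a < y) by omega)]
          rw [foldl_stepA_done]
          simp
        | false =>
          cases hb2 : PySem.Set.contains (PySem.Set.ofList (joueur.map (·.2))) (x + a, y + a) with
          | true =>
            refine ⟨true, ?_⟩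
            rw [if_pos trivial, if_neg (by simp), if_neg (by simp), if_pos (show y + a > y by omega)]
            rw [foldl_stepA_done]
            simp
          | false =>
            obtain ⟨d, hd⟩ := ih (a + 1) (m ++ [(x + a, y + a)]) c (by omega)
            rw [show (a + 1) + (n:Int) = a + (n:Int) + 1 by ring] at hd
            refine ⟨d, ?_⟩
            rw [if_pos trivial, if_neg (by simp), if_pos (by simp)]
            rw [hd]
            rw [show max (a + 1) (max 1 (max (-x) (-y))) = a + 1 by omega]
            simp

theorem main_eq (x y : Int) (joueur adversaire : List (String × (Int × Int))) :
    mvt_f_diag_y x y joueur adversaire = mvt_f_diag_y_alt x y joueur adversaire := by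
  have hl := lowerLoop x y joueur adversaire 8 (-8) (by norm_num)
  rw [show ((-8):Int) + ((8:Nat):Int) = 0 by norm_num] at hl
  rw [show min ((0:Int) - 1) (min (-1) (min (7 - x) (7 - y)))
        = min (-1) (min 7 (min (7 - x) (7 - y))) by omega] at hl
  unfold mvt_f_diag_y mvt_f_diag_y_alt
  rw [PySem.List.pyRange_one_append (-8) 0 8 (by omega) (by omega), List.foldl_append, hl]
  rw [show PySem.List.pyRange 0 8 1 = 0 :: PySem.List.pyRange 1 8 1 from
        PySem.List.pyRange_one_cons (by omega)]
  rw [List.foldl_cons, stepA_skip _ _ _ _ _ 0 (Or.inr rfl)]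
  obtain ⟨d, hd⟩ := upperLoop x y joueur adversaire 7 1
    (walkB x y (PySem.Set.ofList (joueur.map (·.2))) (PySem.Set.ofList (adversaire.map (·.2)))
      (PySem.List.pyRange (min (-1) (min 7 (min (7 - x) (7 - y))))
        (max (-8) (max (-x) (-y)) - 1) (-1))).1.reverse
    (walkB x y (PySem.Set.ofList (joueur.map (·.2))) (PySem.Set.ofList (adversaire.map (·.2)))
      (PySem.List.pyRange (min (-1) (min 7 (min (7 - x) (7 - y))))
        (max (-8) (max (-x) (-y)) - 1) (-1))).2 (by omega)
  rw [show (1:Int) + ((7:Nat):Int) = 8 by norm_num] at hd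
  rw [show min ((8:Int) - 1) (min (7 - x) (7 - y))
        = min 7 (min (7 - x) (7 - y)) by norm_num] at hd
  rw [show max (1:Int) (max 1 (max (-x) (-y))) = max 1 (max (-8) (max (-x) (-y))) by omega] at hd
  rw [hd]

-- ===== VERDICT (by name: the statement is the Claim_ definition above) =====
theorem mvt_f_diag_y_spec : Claim_equal_mvt_f_diag_y := by
  intro x y joueur adversaire _
  exact main_eq x y joueur adversaire
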